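-- pv_equiv track=rewrite | github.com/Frellaganza72/Air-Quality-Prediction | backend/training_fixed.py | find_pollutant_columns
-- ===== SOURCE A (Python) =====
-- def find_pollutant_columns(columns):
--     """Deteksi kolom polutan dengan perbaikan untuk CO"""
--     cols_lower = [str(c).lower() for c in columns]
--     targets = []
--
--     for c in cols_lower:
--         # PM2.5
--         if ("pm2.5" in c) or ("pm2_5" in c) or ("pm2" in c and "temp" not in c):
--             targets.append(c)
--
--         # Ozone (O3)
--         if ("o3" in c) or ("ozon" in c) or ("ozone" in c):
--             targets.append(c)
--
--         # Carbon Monoxide (CO)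
--         cond = (
--             ("carbon_monoxide" in c) or
--             ("carbon monoxide" in c) or
--             (c == "co") or
--             c.endswith("_co") or
--             (" co " in c) or
--             ((c.startswith("co ") or c.endswith(" co")) and ("cloud" not in c and "cover" not in c))
--         )
--         if cond:
--             targets.append(c)
--
--     final = []
--     for t in targets:
--         for orig in columns:
--             if str(orig).lower() == t and orig not in final:
--                 final.append(orig)
--
--     return final
-- ===== SOURCE B (Python) =====
-- def find_pollutant_columns(columns):
--     """Deteksi kolom polutan dengan perbaikan untuk CO"""
--
--     def is_pollutant(c):
--         return (
--             ("pm2.5" in c) or ("pm2_5" in c) or ("pm2" in c and "temp" not in c)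
--             or ("o3" in c) or ("ozon" in c) or ("ozone" in c)
--             or ("carbon_monoxide" in c) or ("carbon monoxide" in c)
--             or (c == "co") or c.endswith("_co") or (" co " in c)
--             or ((c.startswith("co ") or c.endswith(" co"))
--                 and ("cloud" not in c and "cover" not in c))
--         )
--
--     # one pass: group the original columns by lowercased name (insertion order)
--     groups = {}
--     for col in columns:
--         groups.setdefault(str(col).lower(), []).append(col)
--
--     # emit each matching group once, originals deduplicated in first-seen order
--     out = []
--     for name, bucket in groups.items():
--         if is_pollutant(name):
--             out.extend(dict.fromkeys(bucket))
--     return out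
-- ===== Notes on version B (the rewrite author's own statement) =====
-- stated objective: alternative
-- what changed: B replaces A's two staged passes (build a lowercased targets list with repeats, then for each target entry rescan all columns) with a hash index: one pass grouping the original columns by lowercased name in a dict, then one pass over the dict emitting each group whose key matches the pollutant predicate, deduplicated with dict.fromkeys.
import Mathlib
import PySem

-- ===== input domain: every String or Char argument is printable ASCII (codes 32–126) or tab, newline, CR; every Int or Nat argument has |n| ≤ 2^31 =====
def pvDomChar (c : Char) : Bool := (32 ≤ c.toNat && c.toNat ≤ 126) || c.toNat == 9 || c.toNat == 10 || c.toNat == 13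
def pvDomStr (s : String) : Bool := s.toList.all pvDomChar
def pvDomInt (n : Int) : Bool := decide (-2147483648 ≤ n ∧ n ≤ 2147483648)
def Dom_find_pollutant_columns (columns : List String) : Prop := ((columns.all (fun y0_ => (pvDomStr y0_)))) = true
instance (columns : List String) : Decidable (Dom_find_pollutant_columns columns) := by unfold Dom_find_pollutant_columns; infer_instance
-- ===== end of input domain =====

-- B replaces A's two staged passes (lowercased targets list with repeats, then a rescan of all
-- columns per target entry) with a dict grouping the original columns by lowercased name in one
-- pass, then emitting each matching group once (objective: alternative hash-index algorithm).


-- ===== PORT A =====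
def find_pollutant_columns (columns : List String) : List String :=
  let cols_lower := columns.map (fun c => PySem.Str.lower c)
  let targets := cols_lower.foldl (fun ts c =>
    -- PM2.5
    let ts := if PySem.Str.isIn "pm2.5" c || PySem.Str.isIn "pm2_5" c ||
                 (PySem.Str.isIn "pm2" c && !PySem.Str.isIn "temp" c) then ts ++ [c] else ts
    -- Ozone (O3)
    let ts := if PySem.Str.isIn "o3" c || PySem.Str.isIn "ozon" c || PySem.Str.isIn "ozone" c
              then ts ++ [c] else ts
    -- Carbon Monoxide (CO)
    let cond := PySem.Str.isIn "carbon_monoxide" c || PySem.Str.isIn "carbon monoxide" c ||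
                c == "co" || PySem.Str.endswith c "_co" || PySem.Str.isIn " co " c ||
                ((PySem.Str.startswith c "co " || PySem.Str.endswith c " co") &&
                 (!PySem.Str.isIn "cloud" c && !PySem.Str.isIn "cover" c))
    if cond then ts ++ [c] else ts) []
  targets.foldl (fun fin t =>
    columns.foldl (fun fin orig =>
      if PySem.Str.lower orig == t && !fin.contains orig then fin ++ [orig] else fin) fin) []

-- ===== PORT B =====
def pvIsPollutant (c : String) : Bool :=
  PySem.Str.isIn "pm2.5" c || PySem.Str.isIn "pm2_5" c ||
  (PySem.Str.isIn "pm2" c && !PySem.Str.isIn "temp" c) ||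
  PySem.Str.isIn "o3" c || PySem.Str.isIn "ozon" c || PySem.Str.isIn "ozone" c ||
  PySem.Str.isIn "carbon_monoxide" c || PySem.Str.isIn "carbon monoxide" c ||
  c == "co" || PySem.Str.endswith c "_co" || PySem.Str.isIn " co " c ||
  ((PySem.Str.startswith c "co " || PySem.Str.endswith c " co") &&
   (!PySem.Str.isIn "cloud" c && !PySem.Str.isIn "cover" c))

def find_pollutant_columns_alt (columns : List String) : List String :=
  -- groups.setdefault(str(col).lower(), []).append(col)  =  modify with default []
  let groups := columns.foldl
    (fun d col => d.modify (PySem.Str.lower col) [] (fun b => b ++ [col])) PySem.Dict.empty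
  -- for name, bucket in groups.items(): if is_pollutant(name): out.extend(dict.fromkeys(bucket))
  groups.items.foldl
    (fun out p => if pvIsPollutant p.1 then out ++ PySem.List.dedup p.2 else out) []

-- ===== PRECONDITION & SPEC =====
def Spec_find_pollutant_columns (columns : List String) (out : List String) : Prop := out = find_pollutant_columns_alt columns
instance (columns : List String) (out : List String) : Decidable (Spec_find_pollutant_columns columns out) := by unfold Spec_find_pollutant_columns; infer_instance

-- ===== CLAIM (what is proved, stated in full; the proofs are below) =====
def Claim_equal_find_pollutant_columns : Prop := ∀ (columns : List String), Dom_find_pollutant_columns columns → Spec_find_pollutant_columns columns (find_pollutant_columns columns)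

-- ===== LEMMAS AND PROOFS =====

-- A's three match conditions, named for the proofs
def pvC1 (c : String) : Bool :=
  PySem.Str.isIn "pm2.5" c || PySem.Str.isIn "pm2_5" c ||
  (PySem.Str.isIn "pm2" c && !PySem.Str.isIn "temp" c)
def pvC2 (c : String) : Bool :=
  PySem.Str.isIn "o3" c || PySem.Str.isIn "ozon" c || PySem.Str.isIn "ozone" c
def pvC3 (c : String) : Bool :=
  PySem.Str.isIn "carbon_monoxide" c || PySem.Str.isIn "carbon monoxide" c ||
  c == "co" || PySem.Str.endswith c "_co" || PySem.Str.isIn " co " c ||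
  ((PySem.Str.startswith c "co " || PySem.Str.endswith c " co") &&
   (!PySem.Str.isIn "cloud" c && !PySem.Str.isIn "cover" c))

theorem pvIsPollutant_eq (c : String) : pvIsPollutant c = (pvC1 c || pvC2 c || pvC3 c) := by
  simp [pvIsPollutant, pvC1, pvC2, pvC3, Bool.or_assoc]

-- A's inner loop: append to `fin` every column whose lowercase is `t`, deduplicating
def pvGrp (columns fin : List String) (t : String) : List String :=
  columns.foldl (fun fin orig =>
    if PySem.Str.lower orig == t && !fin.contains orig then fin ++ [orig] else fin) fin

theorem mem_pvGrp {x : String} (columns fin : List String) (t : String) (hx : x ∈ fin) :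
    x ∈ pvGrp columns fin t := by
  induction columns generalizing fin with
  | nil => exact hx
  | cons _o _os ih =>
    simp only [pvGrp, List.foldl_cons] at *
    split
    · exact ih _ (List.mem_append_left _ hx)
    · exact ih _ hx

theorem pvGrp_sat {o : String} (columns fin : List String) (t : String)
    (ho : o ∈ columns) (hl : PySem.Str.lower o = t) : o ∈ pvGrp columns fin t := by
  induction columns generalizing fin with
  | nil => cases ho
  | cons p ps ih =>
    simp only [pvGrp, List.foldl_cons]
    rcases List.mem_cons.mp ho with rfl | hmem
    · by_cases hin : o ∈ fin
      · split
        · exact mem_pvGrp _ _ _ (List.mem_append_left _ hin)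
        · exact mem_pvGrp _ _ _ hin
      · rw [if_pos (by simp [hl, hin])]
        exact mem_pvGrp _ _ _ (by simp)
    · split
      · exact ih _ hmem
      · exact ih _ hmem

theorem pvGrp_noop (columns fin : List String) (t : String)
    (h : ∀ o ∈ columns, PySem.Str.lower o = t → o ∈ fin) : pvGrp columns fin t = fin := by
  induction columns generalizing fin with
  | nil => rfl
  | cons p ps ih =>
    have hneg : ¬ (PySem.Str.lower p == t && !fin.contains p) = true := by
      simp only [Bool.and_eq_true, beq_iff_eq, Bool.not_eq_true', List.contains_eq_mem,
        decide_eq_false_iff_not, not_and]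
      exact fun hl hnin => hnin (h p List.mem_cons_self hl)
    simp only [pvGrp, List.foldl_cons, if_neg hneg]
    exact ih _ (fun o ho => h o (List.mem_cons_of_mem _ ho))

theorem pvGrp_idem (columns fin : List String) (t : String) :
    pvGrp columns (pvGrp columns fin t) t = pvGrp columns fin t :=
  pvGrp_noop _ _ _ (fun _ ho hl => pvGrp_sat _ _ _ ho hl)

-- A's per-column contribution to `targets`
def pvEntries (c : String) : List String :=
  (if pvC1 c then [c] else []) ++ (if pvC2 c then [c] else []) ++ (if pvC3 c then [c] else [])

-- the `targets` loop builds exactly the concatenation of the per-column entries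
theorem pvTargets_eq (cs ts : List String) :
    cs.foldl (fun ts c =>
      if pvC3 c then (if pvC2 c then (if pvC1 c then ts ++ [c] else ts) ++ [c]
                      else (if pvC1 c then ts ++ [c] else ts)) ++ [c]
      else (if pvC2 c then (if pvC1 c then ts ++ [c] else ts) ++ [c]
            else (if pvC1 c then ts ++ [c] else ts))) ts = ts ++ cs.flatMap pvEntries := by
  induction cs generalizing ts with
  | nil => simp
  | cons c rest ih =>
    cases h1 : pvC1 c <;> cases h2 : pvC2 c <;> cases h3 : pvC3 c <;>
      simp [pvEntries, h1, h2, h3, ih]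

theorem pvFoldl_entries (columns fin : List String) (c : String) :
    (pvEntries c).foldl (pvGrp columns) fin =
      if pvIsPollutant c then pvGrp columns fin c else fin := by
  rw [pvIsPollutant_eq]
  cases h1 : pvC1 c <;> cases h2 : pvC2 c <;> cases h3 : pvC3 c <;>
    simp [pvEntries, h1, h2, h3, pvGrp_idem]

theorem pvFoldl_grp_flatMap (columns : List String) (cs fin : List String) :
    (cs.flatMap pvEntries).foldl (pvGrp columns) fin =
      cs.foldl (fun fin c => if pvIsPollutant c then pvGrp columns fin c else fin) fin := by
  induction cs generalizing fin with
  | nil => rfl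
  | cons c rest ih =>
    simp only [List.flatMap_cons, List.foldl_append, List.foldl_cons]
    rw [pvFoldl_entries]
    exact ih _

-- A, after collapsing the targets list: one grouped emission per matching lowercased column
theorem pvA_eq (columns : List String) :
    find_pollutant_columns columns =
      columns.foldl (fun fin col =>
        if pvIsPollutant (PySem.Str.lower col) then pvGrp columns fin (PySem.Str.lower col)
        else fin) [] := by
  show ((columns.map (fun c => PySem.Str.lower c)).foldl (fun ts c =>
      if pvC3 c then (if pvC2 c then (if pvC1 c then ts ++ [c] else ts) ++ [c]
                      else (if pvC1 c then ts ++ [c] else ts)) ++ [c]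
      else (if pvC2 c then (if pvC1 c then ts ++ [c] else ts) ++ [c]
            else (if pvC1 c then ts ++ [c] else ts))) []).foldl (pvGrp columns) [] = _
  rw [pvTargets_eq, List.nil_append, pvFoldl_grp_flatMap, List.foldl_map]

-- ordered dedup commutes with filter
theorem pvOfList_filter (q : String → Bool) (l : List String) :
    (PySem.Set.ofList l).filter q = PySem.Set.ofList (l.filter q) := by
  induction l with
  | nil => rfl
  | cons x xs ih =>
    have hd : ∀ (s : PySem.Set String), s.discard x = s.filter (fun y => !(y == x)) :=
      fun _ => rfl
    cases hq : q x with
    | true =>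
      rw [List.filter_cons_of_pos hq, PySem.Set.ofList_cons, PySem.Set.ofList_cons, hd, hd,
          List.filter_cons_of_pos hq, ← ih, List.filter_filter, List.filter_filter]
      exact congrArg _ (List.filter_congr (fun a _ => Bool.and_comm _ _))
    | false =>
      rw [PySem.Set.ofList_cons, hd, List.filter_cons_of_neg (by simp [hq]),
          List.filter_filter, List.filter_cons_of_neg (by simp [hq]), ← ih]
      exact List.filter_congr (fun a _ => by
        cases hax : a == x
        · simp [hax]
        · have hxe : a = x := by simpa using hax
          subst hxe; simp [hq])

-- pvGrp in closed form: the accumulator plus the ordered dedup of the fresh matches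
theorem pvGrp_full (t : String) (cols : List String) : ∀ (fin : List String),
    pvGrp cols fin t =
      fin ++ PySem.Set.ofList
        (cols.filter (fun o => PySem.Str.lower o == t && !fin.contains o)) := by
  induction cols with
  | nil => intro fin; simp [pvGrp]
  | cons o rest ih =>
    intro fin
    rw [show pvGrp (o :: rest) fin t
          = pvGrp rest (if PySem.Str.lower o == t && !fin.contains o then fin ++ [o] else fin) t
        from rfl]
    by_cases hc : (PySem.Str.lower o == t && !fin.contains o) = true
    · rw [if_pos hc, ih]
      have hstep : List.filter (fun o' => PySem.Str.lower o' == t && !fin.contains o') (o :: rest)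
          = o :: rest.filter (fun o' => PySem.Str.lower o' == t && !fin.contains o') := by
        simp only [List.filter_cons, hc, if_true]
      rw [hstep, PySem.Set.ofList_cons]
      have hdis : ((PySem.Set.ofList (rest.filter (fun o' => PySem.Str.lower o' == t && !fin.contains o'))).discard o : List String)
          = PySem.Set.ofList ((rest.filter (fun o' => PySem.Str.lower o' == t && !fin.contains o')).filter (fun y => !(y == o))) := by
        show (PySem.Set.ofList (rest.filter (fun o' => PySem.Str.lower o' == t && !fin.contains o'))).filter (fun y => !(y == o)) = _
        exact pvOfList_filter _ _
      rw [hdis, List.filter_filter]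
      have hfe : List.filter (fun o' => PySem.Str.lower o' == t && !(fin ++ [o]).contains o') rest
          = List.filter (fun a => !(a == o) && (PySem.Str.lower a == t && !fin.contains a)) rest :=
        List.filter_congr (fun a _ => by
          cases ha : a == o <;> cases hl : PySem.Str.lower a == t <;> cases hf : fin.contains a <;>
            simp_all [List.contains_append, List.contains_eq_mem])
      rw [hfe]
      simp [List.append_assoc]
    · rw [if_neg hc, ih]
      have hstep : List.filter (fun o' => PySem.Str.lower o' == t && !fin.contains o') (o :: rest)
          = rest.filter (fun o' => PySem.Str.lower o' == t && !fin.contains o') := by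
        simp only [List.filter_cons, hc, Bool.false_eq_true, if_false]
      rw [hstep]

theorem pvGrp_fresh (t : String) (cols fin : List String)
    (h : ∀ o ∈ cols, PySem.Str.lower o = t → o ∉ fin) :
    pvGrp cols fin t
      = fin ++ PySem.Set.ofList (cols.filter (fun o => PySem.Str.lower o == t)) := by
  rw [pvGrp_full]
  congr 2
  exact List.filter_congr (fun o ho => by
    cases hl : PySem.Str.lower o == t
    · simp [hl]
    · have hne := h o ho (by simpa using hl)
      simp [hl, List.contains_eq_mem, hne])

-- pull the accumulator out of B's emission loop
theorem pvFold_emit (p : String → Bool) (g : String → List String) (l init : List String) :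
    l.foldl (fun out t => if p t then out ++ g t else out) init
      = init ++ l.flatMap (fun t => if p t then g t else []) := by
  have h : (fun (out : List String) t => if p t then out ++ g t else out)
      = (fun out t => out ++ (if p t then g t else [])) := by
    funext out t; split <;> simp
  rw [h, PySem.List.foldl_append_eq_flatMap]

-- the main bridge: A's per-column emission loop equals the emission over the deduped keys
theorem pvMain (columns : List String) (ks : List String) : ∀ (fin seen : List String),
    (∀ o ∈ columns, o ∈ fin ↔ (PySem.Str.lower o ∈ seen ∧ pvIsPollutant (PySem.Str.lower o) = true)) →
    ks.foldl (fun fin t => if pvIsPollutant t then pvGrp columns fin t else fin) fin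
      = fin ++ ((PySem.Set.ofList ks).filter (fun t => !seen.contains t)).flatMap
          (fun t => if pvIsPollutant t then
              PySem.Set.ofList (columns.filter (fun o => PySem.Str.lower o == t)) else []) := by
  induction ks with
  | nil => intro fin seen _; simp
  | cons t ks ih =>
    intro fin seen hinv
    rw [List.foldl_cons, PySem.Set.ofList_cons]
    have hd : ((PySem.Set.ofList ks).discard t : List String)
        = (PySem.Set.ofList ks).filter (fun y => !(y == t)) := rfl
    by_cases ht : t ∈ seen
    · have hct : seen.contains t = true := by simpa [List.contains_eq_mem] using ht
      rw [show List.filter (fun t' => !seen.contains t') (t :: (PySem.Set.ofList ks).discard t)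
            = List.filter (fun t' => !seen.contains t') (PySem.Set.ofList ks) from by
        rw [List.filter_cons_of_neg (by simpa [List.contains_eq_mem] using ht), hd, List.filter_filter]
        exact List.filter_congr (fun a _ => by
          cases hca : a == t
          · simp [hca]
          · have hae : a = t := by simpa using hca
            subst hae; simp [List.contains_eq_mem, ht])]
      have hstep : (if pvIsPollutant t = true then pvGrp columns fin t else fin) = fin := by
        split
        case isTrue hp =>
          exact pvGrp_noop columns fin t (fun o ho hl =>
            (hinv o ho).mpr ⟨hl ▸ ht, by rw [hl]; exact hp⟩)
        case isFalse => rfl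
      rw [hstep]
      exact ih fin seen hinv
    · have hct : seen.contains t = false := by simpa [List.contains_eq_mem] using ht
      rw [List.filter_cons_of_pos (by rw [hct]; rfl), List.flatMap_cons]
      rw [show List.filter (fun t' => !seen.contains t') ((PySem.Set.ofList ks).discard t : List String)
            = (PySem.Set.ofList ks).filter (fun t' => !((t :: seen).contains t')) from by
        rw [hd, List.filter_filter]
        exact List.filter_congr (fun a _ => by
          cases hca : a == t <;> cases hsa : seen.contains a <;>
            simp_all [List.contains_cons, List.contains_eq_mem])]
      by_cases hp : pvIsPollutant t = true
      · rw [if_pos hp, if_pos hp]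
        have hfresh : ∀ o ∈ columns, PySem.Str.lower o = t → o ∉ fin := fun o ho hl hm =>
          ht (hl ▸ ((hinv o ho).mp hm).1)
        rw [pvGrp_fresh t columns fin hfresh]
        have hinv' : ∀ o ∈ columns,
            o ∈ fin ++ PySem.Set.ofList (columns.filter (fun o' => PySem.Str.lower o' == t))
              ↔ (PySem.Str.lower o ∈ t :: seen ∧ pvIsPollutant (PySem.Str.lower o) = true) := by
          intro o ho
          constructor
          · intro hm
            rcases List.mem_append.mp hm with hm | hm
            · rcases (hinv o ho).mp hm with ⟨h1, h2⟩
              exact ⟨List.mem_cons_of_mem _ h1, h2⟩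
            · have hlt : PySem.Str.lower o = t := by
                have := List.of_mem_filter ((PySem.Set.mem_ofList _ _).mp hm)
                simpa using this
              exact ⟨hlt ▸ List.mem_cons_self, by rw [hlt]; exact hp⟩
          · rintro ⟨h1, h2⟩
            rcases List.mem_cons.mp h1 with hlt | hse
            · refine List.mem_append.mpr (Or.inr ?_)
              exact (PySem.Set.mem_ofList _ _).mpr
                (List.mem_filter.mpr ⟨ho, by simpa using hlt⟩)
            · exact List.mem_append.mpr (Or.inl ((hinv o ho).mpr ⟨hse, h2⟩))
        rw [ih _ (t :: seen) hinv', List.append_assoc]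
      · rw [if_neg hp, if_neg hp, List.nil_append]
        have hinv'' : ∀ o ∈ columns,
            o ∈ fin ↔ (PySem.Str.lower o ∈ t :: seen ∧ pvIsPollutant (PySem.Str.lower o) = true) := by
          intro o ho
          rw [hinv o ho]
          constructor
          · rintro ⟨h1, h2⟩; exact ⟨List.mem_cons_of_mem _ h1, h2⟩
          · rintro ⟨h1, h2⟩
            rcases List.mem_cons.mp h1 with hlt | hse
            · exact absurd (hlt ▸ h2) hp
            · exact ⟨hse, h2⟩
        exact ih fin (t :: seen) hinv''

-- B in the same closed form: emission over the dict's deduped keys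
theorem pvB_eq (columns : List String) :
    find_pollutant_columns_alt columns
      = (PySem.Set.ofList (columns.map (fun c => PySem.Str.lower c))).foldl
          (fun out t => if pvIsPollutant t then
              out ++ PySem.Set.ofList (columns.filter (fun o => PySem.Str.lower o == t)) else out)
          [] := by
  have hnodup : (columns.foldl
      (fun d col => d.modify (PySem.Str.lower col) [] (fun b => b ++ [col]))
      PySem.Dict.empty).keys.Nodup :=
    PySem.Dict.nodup_keys_foldl_modify_key columns (fun col => PySem.Str.lower col) []
      (fun _ col b => b ++ [col]) PySem.Dict.empty (by simp [PySem.Dict.keys_empty])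
  have hkeys : (columns.foldl
      (fun d col => d.modify (PySem.Str.lower col) [] (fun b => b ++ [col]))
      PySem.Dict.empty).keys = PySem.Set.ofList (columns.map (fun c => PySem.Str.lower c)) := by
    rw [PySem.Dict.keys_foldl_modify_key columns (fun col => PySem.Str.lower col) []
      (fun _ col b => b ++ [col]) PySem.Dict.empty]
    simp [PySem.Dict.keys_empty, PySem.Set.update_nil_left]
  have hgetD : ∀ t, (columns.foldl
      (fun d col => d.modify (PySem.Str.lower col) [] (fun b => b ++ [col]))
      PySem.Dict.empty).getD t [] = columns.filter (fun o => PySem.Str.lower o == t) := by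
    intro t
    rw [show columns.foldl (fun d col => d.modify (PySem.Str.lower col) [] (fun b => b ++ [col])) PySem.Dict.empty
          = (columns.map (fun col => (PySem.Str.lower col, col))).foldl
              (fun d p => d.modify p.1 [] (fun b => b ++ [p.2])) PySem.Dict.empty from by
      rw [List.foldl_map]]
    rw [PySem.Dict.getD_foldl_modify_append]
    simp [List.filter_map, Function.comp_def]
  show ((columns.foldl (fun d col => d.modify (PySem.Str.lower col) [] (fun b => b ++ [col]))
      PySem.Dict.empty).items).foldl
      (fun out p => if pvIsPollutant p.1 then out ++ PySem.List.dedup p.2 else out) [] = _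
  rw [PySem.Dict.items_eq_map_keys _ hnodup [], List.foldl_map, hkeys]
  congr 1
  funext out k
  rw [hgetD k, PySem.List.dedup_eq_ofList]

-- ===== VERDICT (by name: the statement is the Claim_ definition above) =====
theorem find_pollutant_columns_spec : Claim_equal_find_pollutant_columns := by
  intro columns _
  show find_pollutant_columns columns = find_pollutant_columns_alt columns
  have hmap : columns.foldl (fun fin col =>
        if pvIsPollutant (PySem.Str.lower col) = true then pvGrp columns fin (PySem.Str.lower col)
        else fin) ([] : List String)
      = (columns.map (fun c => PySem.Str.lower c)).foldl (fun fin t =>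
        if pvIsPollutant t = true then pvGrp columns fin t else fin) [] := by
    rw [List.foldl_map]
  rw [pvA_eq, hmap, pvMain columns _ [] [] (fun o _ => by simp), pvB_eq, pvFold_emit]
  simp
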